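-- pv_equiv track=rewrite | github.com/rafaelperazzo/programacao-web | moodledata/vpl_data/46/usersdata/137/18594/submittedfiles/funcoes1.py | decrescente
-- ===== SOURCE A (Python) =====
-- def decrescente (b):
--     cont=0
--     for i in range (0,len(b)-1,1):
--         if b[i]>b[i+1]:
--             cont=cont+1
--     if cont!=0:
--         return True
--     else:
--         return False
-- ===== SOURCE B (Python) =====
-- def decrescente(b):
--     return b != sorted(b)
-- ===== Notes on version B (the rewrite author's own statement) =====
-- stated objective: simpler
-- what changed: Replaced the index-loop that counts adjacent descents and tests the count against zero with a one-line sort-then-compare: b != sorted(b).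
import Mathlib
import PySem

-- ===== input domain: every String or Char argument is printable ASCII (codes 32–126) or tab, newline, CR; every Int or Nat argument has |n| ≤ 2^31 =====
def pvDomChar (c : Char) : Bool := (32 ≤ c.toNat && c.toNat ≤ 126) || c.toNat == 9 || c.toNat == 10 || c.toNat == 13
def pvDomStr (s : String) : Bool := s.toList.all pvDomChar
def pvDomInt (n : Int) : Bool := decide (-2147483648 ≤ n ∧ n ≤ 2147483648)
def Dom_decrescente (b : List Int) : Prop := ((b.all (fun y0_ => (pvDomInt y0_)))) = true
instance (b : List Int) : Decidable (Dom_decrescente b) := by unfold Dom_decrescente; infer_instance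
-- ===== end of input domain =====

-- B replaces A's descent-counting index loop with a one-line sort-then-compare (b != sorted(b)); objective: simpler.


-- ===== PORT A =====
-- for i in range(0, len(b)-1, 1): if b[i] > b[i+1]: cont += 1; return cont != 0
-- (indices produced by the range are always in bounds, so pyGetD's default is never consulted)
def decrescente (b : List Int) : Bool :=
  let cont : Int :=
    (PySem.List.pyRange 0 ((b.length : Int) - 1) 1).foldl
      (fun cont i =>
        if PySem.List.pyGetD b i 0 > PySem.List.pyGetD b (i + 1) 0 then cont + 1 else cont) 0
  if cont ≠ 0 then true else false

-- ===== PORT B =====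
-- return b != sorted(b)
def decrescente_alt (b : List Int) : Bool :=
  decide (b ≠ PySem.List.sorted b (fun x => x))

-- ===== PRECONDITION & SPEC =====
def Spec_decrescente (b : List Int) (out : Bool) : Prop := out = decrescente_alt b
instance (b : List Int) (out : Bool) : Decidable (Spec_decrescente b out) := by unfold Spec_decrescente; infer_instance

-- ===== CLAIM (what is proved, stated in full; the proofs are below) =====
def Claim_equal_decrescente : Prop := ∀ (b : List Int), Dom_decrescente b → Spec_decrescente b (decrescente b)

-- ===== LEMMAS AND PROOFS =====

-- b is already non-decreasing iff it equals its sorted copy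
theorem sorted_fixed_iff_pairwise (b : List Int) :
    b = PySem.List.sorted b (fun x => x) ↔ List.Pairwise (· ≤ ·) b := by
  constructor
  · intro h
    have := PySem.List.sorted_pairwise b (fun x => x)
    rw [← h] at this
    exact this
  · intro h
    exact (PySem.List.sorted_eq_self_of_pairwise b (fun x => x) h).symm

-- some in-range index carries a descent iff b is not non-decreasing
theorem descent_iff_not_pairwise (b : List Int) :
    (∃ i ∈ PySem.List.pyRange 0 ((b.length : Int) - 1) 1,
        PySem.List.pyGetD b (i + 1) 0 < PySem.List.pyGetD b i 0)
      ↔ ¬ List.Pairwise (· ≤ ·) b := by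
  rw [← List.isChain_iff_pairwise, List.isChain_iff_getElem]
  constructor
  · rintro ⟨i, hmem, hlt⟩ hall
    rw [PySem.List.mem_pyRange_one] at hmem
    obtain ⟨h0, hub⟩ := hmem
    have hk : i.toNat + 1 < b.length := by omega
    have hle := hall i.toNat hk
    have e1 : PySem.List.pyGetD b i 0 = b[i.toNat] :=
      PySem.List.pyGetD_eq_getElem b 0 h0 (by omega)
    have e2 : PySem.List.pyGetD b (i + 1) 0 = b[i.toNat + 1] := by
      rw [PySem.List.pyGetD_eq_getElem b 0 (by omega : (0:Int) ≤ i + 1) (by omega)]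
      congr 1
      omega
    rw [e1, e2] at hlt
    omega
  · intro hnot
    by_contra hno
    push_neg at hno
    apply hnot
    intro k hk
    have hmem : (k : Int) ∈ PySem.List.pyRange 0 ((b.length : Int) - 1) 1 := by
      rw [PySem.List.mem_pyRange_one]
      constructor <;> omega
    have := hno (k : Int) hmem
    have e1 : PySem.List.pyGetD b (k : Int) 0 = b[k] := by
      rw [PySem.List.pyGetD_eq_getElem b 0 (by omega : (0:Int) ≤ (k:Int)) (by push_cast; omega)]
      congr 1 <;> omega
    have e2 : PySem.List.pyGetD b ((k : Int) + 1) 0 = b[k + 1] := by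
      rw [PySem.List.pyGetD_eq_getElem b 0 (by omega : (0:Int) ≤ (k:Int) + 1) (by push_cast; omega)]
      congr 1 <;> omega
    rw [e1, e2] at this
    omega

-- A's counting loop is a countP
theorem foldl_count_prop (p : Int → Prop) [DecidablePred p] (l : List Int) (a : Int) :
    l.foldl (fun c i => if p i then c + 1 else c) a
      = a + ((l.countP (fun i => decide (p i)) : Nat) : Int) := by
  induction l generalizing a with
  | nil => simp
  | cons x xs ih =>
    by_cases hx : p x <;> simp [hx, ih] <;> push_cast <;> ring

-- ===== VERDICT (by name: the statement is the Claim_ definition above) =====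
theorem decrescente_spec : Claim_equal_decrescente := by
  intro b _
  unfold Spec_decrescente decrescente decrescente_alt
  show (if List.foldl
      (fun cont i => if PySem.List.pyGetD b i 0 > PySem.List.pyGetD b (i + 1) 0 then cont + 1 else cont)
      0 (PySem.List.pyRange 0 ((b.length : Int) - 1) 1) ≠ 0 then true else false)
    = decide (b ≠ PySem.List.sorted b (fun x => x))
  rw [foldl_count_prop (fun i => PySem.List.pyGetD b i 0 > PySem.List.pyGetD b (i + 1) 0)]
  by_cases h : List.Pairwise (· ≤ ·) b
  · have hb : b = PySem.List.sorted b (fun x => x) := (sorted_fixed_iff_pairwise b).mpr h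
    have hcnt : (PySem.List.pyRange 0 ((b.length : Int) - 1) 1).countP
        (fun i => decide (PySem.List.pyGetD b i 0 > PySem.List.pyGetD b (i + 1) 0)) = 0 := by
      rw [List.countP_eq_zero]
      intro i hi
      simp only [decide_eq_true_eq, gt_iff_lt]
      intro hlt
      exact ((descent_iff_not_pairwise b).mp ⟨i, hi, hlt⟩) h
    simp [hcnt, ← hb]
  · obtain ⟨i, hi, hlt⟩ := (descent_iff_not_pairwise b).mpr h
    have hcnt : 0 < (PySem.List.pyRange 0 ((b.length : Int) - 1) 1).countP
        (fun i => decide (PySem.List.pyGetD b i 0 > PySem.List.pyGetD b (i + 1) 0)) := by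
      rw [List.countP_pos_iff]
      exact ⟨i, hi, by simpa [gt_iff_lt] using hlt⟩
    have hb : b ≠ PySem.List.sorted b (fun x => x) :=
      fun e => h ((sorted_fixed_iff_pairwise b).mp e)
    have hnz : (0 : Int) + ((PySem.List.pyRange 0 ((b.length : Int) - 1) 1).countP
        (fun i => decide (PySem.List.pyGetD b i 0 > PySem.List.pyGetD b (i + 1) 0)) : Int) ≠ 0 := by
      push_cast
      omega
    rw [if_pos hnz]
    simp [hb]
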